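-- pv_equiv track=rewrite | github.com/TreesClouds/PiE2021 | fullcode.py | robot_triplet
-- ===== SOURCE A (Python) =====
-- def robot_triplet(team_weights, target):
--     possibilities = []
--     for first in team_weights:
--         for second in team_weights:
--             for third in team_weights:
--                 tup = (first, second, third)
--                 if sum(tup) == target and third > second > first:
--                     possibilities.append(tup)
--     return possibilities
-- ===== SOURCE B (Python) =====
-- def robot_triplet(team_weights, target):
--     counts = {}
--     for w in team_weights:
--         counts[w] = counts.get(w, 0) + 1
--     possibilities = []
--     for first in team_weights:
--         for second in team_weights:
--             if second > first:
--                 third = target - first - second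
--                 if third > second:
--                     possibilities.extend([(first, second, third)] * counts.get(third, 0))
--     return possibilities
-- ===== Notes on version B (the rewrite author's own statement) =====
-- stated objective: faster
-- what changed: Replaces the innermost scan over candidate thirds by a one-pass multiplicity dict: for each (first,second) pair the unique needed third value target-first-second is emitted count(third) times, turning O(n^3) into O(n^2).
import Mathlib
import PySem

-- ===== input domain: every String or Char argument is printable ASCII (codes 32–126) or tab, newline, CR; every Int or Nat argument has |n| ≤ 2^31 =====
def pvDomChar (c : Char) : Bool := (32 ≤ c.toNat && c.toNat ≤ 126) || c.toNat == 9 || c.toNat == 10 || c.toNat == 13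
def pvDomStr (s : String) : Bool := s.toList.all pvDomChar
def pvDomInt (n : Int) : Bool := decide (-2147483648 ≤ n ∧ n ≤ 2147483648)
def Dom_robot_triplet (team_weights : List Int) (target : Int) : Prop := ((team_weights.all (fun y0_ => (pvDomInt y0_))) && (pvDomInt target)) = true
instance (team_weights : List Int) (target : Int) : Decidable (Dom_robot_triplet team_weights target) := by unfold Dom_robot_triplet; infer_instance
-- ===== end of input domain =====

-- B replaces A's innermost loop over thirds by a count lookup of the one needed third value (O(n^3) → O(n^2)); same output, order and multiplicities included.

-- ===== PORT A =====
def robot_triplet (team_weights : List Int) (target : Int) : List (List Int) :=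
  team_weights.foldl (fun acc1 first =>
    team_weights.foldl (fun acc2 second =>
      team_weights.foldl (fun acc3 third =>
        if first + second + third = target ∧ third > second ∧ second > first then
          acc3 ++ [[first, second, third]]
        else acc3) acc2) acc1) []

-- ===== PORT B =====
def robot_triplet_alt (team_weights : List Int) (target : Int) : List (List Int) :=
  let counts := team_weights.foldl (fun d w => d.insert w (d.getD w 0 + 1)) (PySem.Dict.empty : PySem.Dict Int Int)
  team_weights.foldl (fun acc1 first =>
    team_weights.foldl (fun acc2 second =>
      if second > first then
        let third := target - first - second
        if third > second then
          acc2 ++ List.replicate (counts.getD third 0).toNat [first, second, third]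
        else acc2
      else acc2) acc1) []

-- ===== PRECONDITION & SPEC =====
def Spec_robot_triplet (team_weights : List Int) (target : Int) (out : List (List Int)) : Prop := out = robot_triplet_alt team_weights target
instance (team_weights : List Int) (target : Int) (out : List (List Int)) : Decidable (Spec_robot_triplet team_weights target out) := by unfold Spec_robot_triplet; infer_instance

-- ===== CLAIM (what is proved, stated in full; the proofs are below) =====
def Claim_equal_robot_triplet : Prop := ∀ (team_weights : List Int) (target : Int), Dom_robot_triplet team_weights target → Spec_robot_triplet team_weights target (robot_triplet team_weights target)

-- ===== LEMMAS AND PROOFS =====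

-- A's innermost loop appends one triple per occurrence of the single needed third value.
theorem inner3_eq (tw : List Int) (target first second : Int) (acc : List (List Int)) :
    tw.foldl (fun acc3 third =>
      if first + second + third = target ∧ third > second ∧ second > first then
        acc3 ++ [[first, second, third]]
      else acc3) acc
    = acc ++ (if second > first ∧ target - first - second > second then
        List.replicate (tw.count (target - first - second)) [first, second, target - first - second]
      else []) := by
  induction tw generalizing acc with
  | nil => simp
  | cons x xs ih =>
    simp only [List.foldl_cons, ih, List.count_cons]
    by_cases hx : x = target - first - second
    · subst hx
      by_cases h : second > first ∧ target - first - second > second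
      · rw [if_pos ⟨by ring, h.2, h.1⟩, if_pos h, if_pos h]
        simp [List.replicate_succ]
      · rw [if_neg (by rintro ⟨-, h2, h1⟩; exact h ⟨h1, by omega⟩), if_neg h, if_neg h]
    · rw [if_neg (by rintro ⟨hs, -, -⟩; exact hx (by omega))]
      simp [hx]

theorem robot_triplet_eq_alt (team_weights : List Int) (target : Int) :
    robot_triplet team_weights target = robot_triplet_alt team_weights target := by
  unfold robot_triplet robot_triplet_alt
  simp only [PySem.Dict.foldl_insert_getD_add_one_eq_counter, PySem.Dict.getD_counter,
    inner3_eq, Int.toNat_natCast]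
  congr 1
  funext acc1 first
  congr 1
  funext acc2 second
  by_cases h1 : second > first
  · by_cases h2 : target - first - second > second
    · simp [h1, h2]
    · simp [h1, h2]
  · simp [h1]

-- ===== VERDICT (by name: the statement is the Claim_ definition above) =====
theorem robot_triplet_spec : Claim_equal_robot_triplet := by
  intro tw t _
  unfold Spec_robot_triplet
  exact robot_triplet_eq_alt tw t
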